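-- pv_equiv track=rewrite | github.com/ravikumarvj/DS-and-algorithms | strings/inplace_mod.py | in_place_mod_eff
-- ===== SOURCE A (Python) =====
-- def in_place_mod_eff(string):
--     i = 0
--     k = 0
--     while i < len(string):
--         if k > 0 and string[k - 1] == 'a' and string[i] == 'b':
--             k -= 1
--             i += 1
--         elif string[i] == 'c':
--             i += 1
--         else:
--             string[k] = string[i]
--             i += 1
--             k += 1
--     del string[k:]
--     return string
-- ===== SOURCE B (Python) =====
-- def in_place_mod_eff(string):
--     # Phase 1: drop every 'c'.
--     filtered = [ch for ch in string if ch != 'c']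
--     # Phase 2: stack pass cancelling 'a' immediately followed by 'b'.
--     out = []
--     for ch in filtered:
--         if ch == 'b' and out and out[-1] == 'a':
--             out.pop()
--         else:
--             out.append(ch)
--     string[:] = out
--     return string
-- ===== Notes on version B (the rewrite author's own statement) =====
-- stated objective: simpler
-- what changed: Replaces the fused two-pointer in-place compaction with two clean passes: a list comprehension filtering out 'c', then an explicit stack pass that pops an 'a' when a 'b' arrives; the list is mutated in place via slice assignment like A.
import Mathlib
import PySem

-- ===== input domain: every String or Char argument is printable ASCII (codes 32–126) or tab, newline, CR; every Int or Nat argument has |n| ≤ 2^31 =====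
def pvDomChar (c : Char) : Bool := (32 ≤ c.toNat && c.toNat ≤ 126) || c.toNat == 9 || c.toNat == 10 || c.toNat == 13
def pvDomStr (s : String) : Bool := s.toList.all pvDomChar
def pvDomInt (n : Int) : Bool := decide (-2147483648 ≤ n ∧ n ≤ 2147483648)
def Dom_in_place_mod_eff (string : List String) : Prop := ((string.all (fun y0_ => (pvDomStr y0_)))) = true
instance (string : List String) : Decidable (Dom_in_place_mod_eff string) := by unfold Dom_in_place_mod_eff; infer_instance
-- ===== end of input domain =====

-- B replaces A's fused two-pointer compaction by two separate passes (filter 'c', then a stack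
-- pass cancelling 'a'+'b'); objective: simpler. Both Pythons mutate the argument list in place
-- identically (the final list IS the returned list); the theorems are about the returned value.

-- ===== PORT A =====
-- while loop of A: state (lst, i, k); indices are always in range where Python reads them,
-- so List.getD is exact there (Python raises nowhere on a list input).
def pvALoop (lst : List String) (i k : Nat) : List String × Nat :=
  if _h : i < lst.length then
    if 0 < k ∧ lst.getD (k - 1) "" = "a" ∧ lst.getD i "" = "b" then
      pvALoop lst (i + 1) (k - 1)
    else if lst.getD i "" = "c" then
      pvALoop lst (i + 1) k
    else
      pvALoop (lst.set k (lst.getD i "")) (i + 1) (k + 1)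
  else (lst, k)
termination_by lst.length - i
decreasing_by all_goals simp_all [List.length_set]; omega

def in_place_mod_eff (string : List String) : List String :=
  let r := pvALoop string 0 0
  r.1.take r.2          -- del string[k:]

-- ===== PORT B =====
-- one step of B's stack pass
def pvStepB (out : List String) (ch : String) : List String :=
  if ch = "b" ∧ out ≠ [] ∧ out.getLast? = some "a" then out.dropLast else out ++ [ch]

def in_place_mod_eff_alt (string : List String) : List String :=
  let filtered := string.filter (fun ch => ch ≠ "c")
  filtered.foldl pvStepB []

-- ===== PRECONDITION & SPEC =====
def Spec_in_place_mod_eff (string : List String) (out : List String) : Prop := out = in_place_mod_eff_alt string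
instance (string : List String) (out : List String) : Decidable (Spec_in_place_mod_eff string out) := by unfold Spec_in_place_mod_eff; infer_instance

-- ===== CLAIM (what is proved, stated in full; the proofs are below) =====
def Claim_equal_in_place_mod_eff : Prop := ∀ (string : List String), Dom_in_place_mod_eff string → Spec_in_place_mod_eff string (in_place_mod_eff string)

-- ===== LEMMAS AND PROOFS =====

-- B's two passes fused into one step function (proof device only)
def pvStep' (out : List String) (ch : String) : List String :=
  if ch = "c" then out else pvStepB out ch

lemma foldl_filter_step' : ∀ (l : List String) (acc : List String),
    (l.filter (fun ch => ch ≠ "c")).foldl pvStepB acc = l.foldl pvStep' acc := by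
  intro l
  induction l with
  | nil => intro acc; rfl
  | cons h t ih =>
    intro acc
    rw [List.filter_cons]
    by_cases hc : h = "c"
    · rw [if_neg (by simp [hc]), ih, List.foldl_cons]
      simp [pvStep', hc]
    · rw [if_pos (by simp [hc]), List.foldl_cons, ih, List.foldl_cons]
      simp [pvStep', hc]

lemma pvALoop_eq : ∀ (n : ℕ) (lst : List String) (i k : Nat), lst.length - i = n → k ≤ i → i ≤ lst.length →
    (pvALoop lst i k).1.take (pvALoop lst i k).2 = (lst.drop i).foldl pvStep' (lst.take k) := by
  intro n
  induction n with
  | zero =>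
    intro lst i k hn hki hil
    have hi : ¬ i < lst.length := by omega
    rw [pvALoop]
    simp [hi, List.drop_eq_nil_of_le (by omega : lst.length ≤ i)]
  | succ n ih =>
    intro lst i k hn hki hil
    have hi : i < lst.length := by omega
    have hdrop : lst.drop i = lst[i] :: lst.drop (i + 1) :=
      List.drop_eq_getElem_cons hi
    have hgetD_i : lst.getD i "" = lst[i] := List.getD_eq_getElem lst "" hi
    -- correspondence of the stack-top test
    have htake_ne : ∀ hk : 0 < k, lst.take k ≠ [] := by
      intro hk
      have : (lst.take k).length = k := by simp; omega
      intro hemp; rw [hemp] at this; simp at this; omega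
    have hlast : ∀ _hk : 0 < k, (lst.take k).getLast? = some (lst.getD (k-1) "") := by
      intro hk
      have hlt : k - 1 < lst.length := by omega
      rw [List.getLast?_eq_getElem?]
      have hlen : (lst.take k).length = k := by simp; omega
      rw [hlen, List.getElem?_take, if_pos (by omega : k - 1 < k), List.getElem?_eq_getElem hlt,
          List.getD_eq_getElem lst "" hlt]
    rw [pvALoop]
    simp only [hi, dite_true]
    by_cases hb : 0 < k ∧ lst.getD (k - 1) "" = "a" ∧ lst.getD i "" = "b"
    · -- cancel branch
      obtain ⟨hk, ha, hbb⟩ := hb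
      rw [if_pos ⟨hk, ha, hbb⟩]
      rw [ih lst (i+1) (k-1) (by omega) (by omega) (by omega)]
      rw [hdrop]
      simp only [List.foldl_cons]
      congr 1
      rw [← hgetD_i, hbb]
      rw [pvStep', if_neg (by decide), pvStepB,
          if_pos ⟨rfl, htake_ne hk, by rw [hlast hk, ha]⟩]
      rw [List.dropLast_eq_take, List.take_take]
      congr 1
      simp; omega
    · rw [if_neg hb]
      by_cases hc : lst.getD i "" = "c"
      · rw [if_pos hc]
        rw [ih lst (i+1) k (by omega) (by omega) (by omega)]
        rw [hdrop]
        simp only [List.foldl_cons]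
        congr 1
        rw [← hgetD_i, hc, pvStep', if_pos rfl]
      · rw [if_neg hc]
        set lst' := lst.set k (lst.getD i "") with hlst'
        have hklen : k < lst.length := by omega
        rw [ih lst' (i+1) (k+1) (by simp [hlst']; omega) (by omega) (by simp [hlst']; omega)]
        have hd : lst'.drop (i+1) = lst.drop (i+1) := by
          apply List.ext_getElem
          · simp [hlst']
          · intro m hm1 hm2
            simp only [hlst', List.getElem_drop, List.getElem_set]
            rw [if_neg (by omega)]
        have ht : lst'.take (k+1) = lst.take k ++ [lst.getD i ""] := by
          apply List.ext_getElem
          · simp [hlst']; omega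
          · intro m hm1 hm2
            simp only [hlst', List.length_take] at hm1
            by_cases hmk : m < k
            · simp only [hlst', List.getElem_take, List.getElem_set]
              rw [if_neg (by omega)]
              rw [List.getElem_append_left (by simp; omega)]
              simp [List.getElem_take]
            · have hmk' : m = k := by omega
              subst hmk'
              simp [hlst']
        rw [hd, ht, hdrop]
        simp only [List.foldl_cons]
        congr 1
        rw [← hgetD_i, pvStep', if_neg hc, pvStepB]
        rw [if_neg]
        intro ⟨h1, h2, h3⟩
        apply hb
        have hk : 0 < k := by
          by_contra hk0
          have : k = 0 := by omega
          subst this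
          simp at h2
        refine ⟨hk, ?_, by rw [hgetD_i] at h1 ⊢; exact h1⟩
        have := hlast hk
        rw [this] at h3
        exact Option.some_injective _ h3

-- ===== VERDICT (by name: the statement is the Claim_ definition above) =====
theorem in_place_mod_eff_spec : Claim_equal_in_place_mod_eff := by
  intro string _
  unfold Spec_in_place_mod_eff in_place_mod_eff in_place_mod_eff_alt
  rw [foldl_filter_step']
  rw [pvALoop_eq string.length string 0 0 (by omega) (le_refl 0) (by omega)]
  simp
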